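-- pv_equiv track=rewrite | github.com/potomatoo/TIL | Programmers/kakao_쿠키 구입.py | solution
-- ===== SOURCE A (Python) =====
-- def solution(cookie):
--     answer = 0
--     all = sum(cookie)
--     can_max = all // 2
--     flag = False
--     for i in range(len(cookie)-1):
--         for j in range(i+1, len(cookie)):
--             before = sum(cookie[i:j])
--             if before > can_max:
--                 break
--             if before <= answer:
--                 continue
--             for r in range(len(cookie), j, -1):
--                 after = sum(cookie[j:r])
--                 if before > after:
--                     break
--                 if before == after:
--                     if before == can_max:
--                         return can_max
--                     answer = max(before, answer)
--                     flag = True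
--                     break
--
--     if flag:
--         return answer
--     return 0
-- ===== SOURCE B (Python) =====
-- def solution(cookie):
--     n = len(cookie)
--     P = [0]
--     for x in cookie:
--         P.append(P[-1] + x)
--     can_max = P[n] // 2
--     answer = 0
--     for i in range(n - 1):
--         for j in range(i + 1, n):
--             before = P[j] - P[i]
--             if before > can_max:
--                 break
--             if before <= answer:
--                 continue
--             rs = [r for r in range(j + 1, n + 1) if P[r] - P[j] <= before]
--             if rs and P[max(rs)] - P[j] == before:
--                 if before == can_max:
--                     return can_max
--                 answer = before
--     return answer
-- ===== Notes on version B (the rewrite author's own statement) =====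
-- stated objective: alternative
-- what changed: B precomputes a prefix-sum array once so every range sum is a subtraction instead of a re-summed slice, and replaces A's descending break-scan for the right segment by 'the largest r whose segment sum is <= before', computed as the max of a filtered range; A's answer/flag pair collapses to the answer alone.
import Mathlib
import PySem

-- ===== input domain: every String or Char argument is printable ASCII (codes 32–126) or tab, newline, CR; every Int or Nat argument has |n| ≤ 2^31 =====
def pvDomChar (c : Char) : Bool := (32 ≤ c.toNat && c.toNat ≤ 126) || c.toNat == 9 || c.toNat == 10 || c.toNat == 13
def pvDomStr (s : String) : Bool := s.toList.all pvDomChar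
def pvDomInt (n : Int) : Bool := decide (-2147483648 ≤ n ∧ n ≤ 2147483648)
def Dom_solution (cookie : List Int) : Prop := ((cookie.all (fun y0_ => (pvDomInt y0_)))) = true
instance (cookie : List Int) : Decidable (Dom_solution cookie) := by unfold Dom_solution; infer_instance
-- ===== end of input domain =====

-- B replaces A's repeatedly re-summed slices by one prefix-sum array and A's descending
-- break-scan over r by 'the largest r whose segment sum is ≤ before' (max of a filtered range),
-- and drops the redundant flag; an alternative decomposition of the same search.

-- ===== PORT A =====
-- r loop of A: '.error v' = Python's 'return can_max'; '.ok (some a)' = match found, a the new answer; '.ok none' = no match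
def rloopA (cookie : List Int) (canMax before answer j : Int) : List Int → Except Int (Option Int)
  | [] => .ok none
  | r :: rest =>
    let after := (PySem.List.slice cookie (some j) (some r)).sum
    if before > after then .ok none
    else if before = after then
      if before = canMax then .error canMax
      else .ok (some (max before answer))
    else rloopA cookie canMax before answer j rest

-- j loop of A, state (answer, flag)
def jloopA (cookie : List Int) (canMax i : Int) : List Int → Int → Bool → Except Int (Int × Bool)
  | [], answer, flag => .ok (answer, flag)
  | j :: rest, answer, flag =>
    let before := (PySem.List.slice cookie (some i) (some j)).sum
    if before > canMax then .ok (answer, flag)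
    else if before ≤ answer then jloopA cookie canMax i rest answer flag
    else
      match rloopA cookie canMax before answer j (PySem.List.pyRange (cookie.length : Int) j (-1)) with
      | .error v => .error v
      | .ok none => jloopA cookie canMax i rest answer flag
      | .ok (some a') => jloopA cookie canMax i rest a' true

def iloopA (cookie : List Int) (canMax : Int) : List Int → Int → Bool → Except Int (Int × Bool)
  | [], answer, flag => .ok (answer, flag)
  | i :: rest, answer, flag =>
    match jloopA cookie canMax i (PySem.List.pyRange (i + 1) (cookie.length : Int) 1) answer flag with
    | .error v => .error v
    | .ok (a', f') => iloopA cookie canMax rest a' f'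

def solution (cookie : List Int) : Int :=
  let all := cookie.sum
  let canMax := PySem.Int.floordiv all 2
  match iloopA cookie canMax (PySem.List.pyRange 0 ((cookie.length : Int) - 1) 1) 0 false with
  | .error v => v
  | .ok (answer, flag) => if flag then answer else 0

-- ===== PORT B =====
-- Source B: P = [0]; for x in cookie: P.append(P[-1] + x)
def prefixesB (acc : Int) : List Int → List Int
  | [] => [acc]
  | x :: xs => acc :: prefixesB (acc + x) xs

-- P[k] for the always-in-range indices Source B uses
def pgetB (P : List Int) (i : Int) : Int := PySem.List.pyGetD P i 0

def jloopB (cookie P : List Int) (canMax i : Int) : List Int → Int → Except Int Int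
  | [], answer => .ok answer
  | j :: rest, answer =>
    let before := pgetB P j - pgetB P i
    if before > canMax then .ok answer
    else if before ≤ answer then jloopB cookie P canMax i rest answer
    else
      let rs := (PySem.List.pyRange (j + 1) ((cookie.length : Int) + 1) 1).filter
        (fun r => pgetB P r - pgetB P j ≤ before)
      match PySem.List.max? rs (fun x => x) with
      | none => jloopB cookie P canMax i rest answer
      | some m =>
        if pgetB P m - pgetB P j = before then
          if before = canMax then .error canMax
          else jloopB cookie P canMax i rest before
        else jloopB cookie P canMax i rest answer

def iloopB (cookie P : List Int) (canMax : Int) : List Int → Int → Except Int Int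
  | [], answer => .ok answer
  | i :: rest, answer =>
    match jloopB cookie P canMax i (PySem.List.pyRange (i + 1) (cookie.length : Int) 1) answer with
    | .error v => .error v
    | .ok a' => iloopB cookie P canMax rest a'

def solution_alt (cookie : List Int) : Int :=
  let P := prefixesB 0 cookie
  let canMax := PySem.Int.floordiv (pgetB P (cookie.length : Int)) 2
  match iloopB cookie P canMax (PySem.List.pyRange 0 ((cookie.length : Int) - 1) 1) 0 with
  | .error v => v
  | .ok answer => answer

-- ===== PRECONDITION & SPEC =====
def Spec_solution (cookie : List Int) (out : Int) : Prop := out = solution_alt cookie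
instance (cookie : List Int) (out : Int) : Decidable (Spec_solution cookie out) := by unfold Spec_solution; infer_instance

-- ===== CLAIM (what is proved, stated in full; the proofs are below) =====
def Claim_equal_solution : Prop := ∀ (cookie : List Int), Dom_solution cookie → Spec_solution cookie (solution cookie)

-- ===== LEMMAS AND PROOFS =====

-- P[k] = acc + sum of the first k cookies
theorem prefixesB_getD (c : List Int) : ∀ (acc : Int) (k : Nat), k ≤ c.length →
    (prefixesB acc c).getD k 0 = acc + (c.take k).sum := by
  induction c with
  | nil =>
    intro acc k hk
    have hk0 : k = 0 := by simpa using hk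
    subst hk0; simp [prefixesB]
  | cons x xs ih =>
    intro acc k hk
    cases k with
    | zero => simp [prefixesB]
    | succ k' =>
      simp only [prefixesB, List.getD_cons_succ, List.take_succ_cons, List.sum_cons]
      rw [ih (acc + x) k' (by simpa using hk)]
      ring

-- the prefix-difference Source B uses equals the slice sum A re-computes
theorem pref_diff (c : List Int) (a b : Int) (h0 : 0 ≤ a) (hab : a ≤ b) (hbn : b ≤ (c.length : Int)) :
    pgetB (prefixesB 0 c) b - pgetB (prefixesB 0 c) a = (PySem.List.slice c (some a) (some b)).sum := by
  obtain ⟨aN, rfl⟩ : ∃ n : Nat, a = (n : Int) := ⟨a.toNat, by omega⟩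
  obtain ⟨bN, rfl⟩ : ∃ n : Nat, b = (n : Int) := ⟨b.toNat, by omega⟩
  have haN : aN ≤ bN := by exact_mod_cast hab
  have hbN : bN ≤ c.length := by exact_mod_cast hbn
  simp only [pgetB, PySem.List.pyGetD_natCast, PySem.List.slice_natCast]
  rw [prefixesB_getD c 0 aN (le_trans haN hbN), prefixesB_getD c 0 bN hbN]
  have h : c.take bN = c.take aN ++ (c.drop aN).take (bN - aN) := by
    rw [← List.take_add]; congr 1; omega
  rw [h, List.sum_append]; ring

-- max of a strictly increasing list is its last element
theorem foldl_max_getLast : ∀ (t : List Int) (x : Int), (x :: t).Pairwise (· < ·) →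
    t.foldl max x = (x :: t).getLast (List.cons_ne_nil x t) := by
  intro t
  induction t with
  | nil => intro x _; simp
  | cons y t' ih =>
    intro x h
    have hxy : x < y := (List.pairwise_cons.1 h).1 y (List.mem_cons_self)
    have := ih y (List.pairwise_cons.1 h).2
    simp only [List.foldl_cons, max_eq_right hxy.le]
    rw [List.getLast_cons (List.cons_ne_nil y t')]
    exact this

theorem max?_eq_getLast? (xs : List Int) (h : xs.Pairwise (· < ·)) :
    PySem.List.max? xs (fun y => y) = xs.getLast? := by
  cases xs with
  | nil => simp [PySem.List.max?_eq_none_iff]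
  | cons x t =>
    rw [PySem.List.max?_id_cons, foldl_max_getLast t x h, List.getLast?_eq_some_getLast]

-- A's descending r scan = first qualifying r = head of the filtered descending list
theorem rloopA_head (cookie : List Int) (canMax before answer j : Int) :
    ∀ (L : List Int), rloopA cookie canMax before answer j L =
      match (L.filter (fun r => (PySem.List.slice cookie (some j) (some r)).sum ≤ before)).head? with
      | none => .ok none
      | some r =>
        if (PySem.List.slice cookie (some j) (some r)).sum = before then
          (if before = canMax then .error canMax else .ok (some (max before answer)))
        else .ok none := by
  intro L
  induction L with
  | nil => simp [rloopA]
  | cons r rest ih =>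
    simp only [rloopA]
    by_cases h1 : before > (PySem.List.slice cookie (some j) (some r)).sum
    · rw [if_pos h1]
      rw [List.filter_cons_of_pos (by simp; omega)]
      simp only [List.head?_cons]
      rw [if_neg (by omega)]
    · rw [if_neg h1]
      by_cases h2 : before = (PySem.List.slice cookie (some j) (some r)).sum
      · rw [if_pos h2]
        rw [List.filter_cons_of_pos (by simp; omega)]
        simp only [List.head?_cons]
        rw [if_pos h2.symm]
      · rw [if_neg h2]
        rw [List.filter_cons_of_neg (by simp; omega)]
        exact ih

-- B's answer never decreases
theorem jloopB_mono (cookie P : List Int) (canMax i : Int) :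
    ∀ (js : List Int) (ans a : Int), jloopB cookie P canMax i js ans = .ok a → ans ≤ a := by
  intro js
  induction js with
  | nil => intro ans a h; simp only [jloopB] at h; cases h; omega
  | cons j rest ih =>
    intro ans a h
    simp only [jloopB] at h
    by_cases h1 : pgetB P j - pgetB P i > canMax
    · rw [if_pos h1] at h; cases h; omega
    rw [if_neg h1] at h
    by_cases h2 : pgetB P j - pgetB P i ≤ ans
    · rw [if_pos h2] at h; exact ih ans a h
    rw [if_neg h2] at h
    rcases hm : PySem.List.max? ((PySem.List.pyRange (j + 1) ((cookie.length : Int) + 1) 1).filter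
        (fun r => pgetB P r - pgetB P j ≤ pgetB P j - pgetB P i)) (fun x => x) with _ | m <;>
      rw [hm] at h
    · exact ih ans a h
    · have h' : (if pgetB P m - pgetB P j = pgetB P j - pgetB P i then
          (if pgetB P j - pgetB P i = canMax then (Except.error canMax : Except Int Int)
            else jloopB cookie P canMax i rest (pgetB P j - pgetB P i))
          else jloopB cookie P canMax i rest ans) = Except.ok a := h
      by_cases h3 : pgetB P m - pgetB P j = pgetB P j - pgetB P i
      · rw [if_pos h3] at h'
        by_cases h4 : pgetB P j - pgetB P i = canMax
        · rw [if_pos h4] at h'; cases h'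
        · rw [if_neg h4] at h'; have := ih _ a h'; omega
      · rw [if_neg h3] at h'; exact ih ans a h'

theorem iloopB_mono (cookie P : List Int) (canMax : Int) :
    ∀ (is : List Int) (ans a : Int), iloopB cookie P canMax is ans = .ok a → ans ≤ a := by
  intro is
  induction is with
  | nil => intro ans a h; simp only [iloopB] at h; cases h; omega
  | cons i rest ih =>
    intro ans a h
    simp only [iloopB] at h
    rcases hj : jloopB cookie P canMax i (PySem.List.pyRange (i + 1) (cookie.length : Int) 1) ans
      with v | a' <;> rw [hj] at h
    · cases h
    · exact le_trans (jloopB_mono _ _ _ _ _ _ _ hj) (ih a' a h)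

-- the j loops agree
theorem jloop_eq (cookie : List Int) (canMax i : Int) (hi : 0 ≤ i) :
    ∀ (js : List Int), (∀ j ∈ js, i < j ∧ j < (cookie.length : Int)) →
    ∀ (ans : Int) (flag : Bool),
    jloopA cookie canMax i js ans flag =
      (jloopB cookie (prefixesB 0 cookie) canMax i js ans).map
        (fun a => (a, flag || decide (ans < a))) := by
  intro js
  induction js with
  | nil => intro _ ans flag; simp [jloopA, jloopB, Except.map]
  | cons j rest ih =>
    intro hjs ans flag
    obtain ⟨hij, hjn⟩ := hjs j List.mem_cons_self
    have hrest := fun j' hj' => hjs j' (List.mem_cons_of_mem _ hj')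
    have hbefore : pgetB (prefixesB 0 cookie) j - pgetB (prefixesB 0 cookie) i
        = (PySem.List.slice cookie (some i) (some j)).sum :=
      pref_diff cookie i j hi (by omega) (by omega)
    simp only [jloopA, jloopB, hbefore]
    by_cases h1 : (PySem.List.slice cookie (some i) (some j)).sum > canMax
    · rw [if_pos h1, if_pos h1]; simp [Except.map]
    rw [if_neg h1, if_neg h1]
    by_cases h2 : (PySem.List.slice cookie (some i) (some j)).sum ≤ ans
    · rw [if_pos h2, if_pos h2]; exact ih hrest ans flag
    rw [if_neg h2, if_neg h2]
    -- the two filtered candidate lists coincide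
    have hfe : (PySem.List.pyRange (j + 1) ((cookie.length : Int) + 1) 1).filter
          (fun r => pgetB (prefixesB 0 cookie) r - pgetB (prefixesB 0 cookie) j ≤
            (PySem.List.slice cookie (some i) (some j)).sum)
        = (PySem.List.pyRange (j + 1) ((cookie.length : Int) + 1) 1).filter
          (fun r => (PySem.List.slice cookie (some j) (some r)).sum ≤
            (PySem.List.slice cookie (some i) (some j)).sum) := by
      apply List.filter_congr
      intro r hr
      obtain ⟨hr1, hr2⟩ := PySem.List.mem_pyRange_one.1 hr
      rw [pref_diff cookie j r (by omega) (by omega) (by omega)]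
    rw [rloopA_head, PySem.List.pyRange_neg_one_eq_reverse, List.filter_reverse, List.head?_reverse,
      max?_eq_getLast? _ ((PySem.List.pairwise_lt_pyRange_one _ _).filter _), hfe]
    rcases hlast : ((PySem.List.pyRange (j + 1) ((cookie.length : Int) + 1) 1).filter
        (fun r => (PySem.List.slice cookie (some j) (some r)).sum ≤
          (PySem.List.slice cookie (some i) (some j)).sum)).getLast? with _ | m
    · exact ih hrest ans flag
    · have hmM : m ∈ (PySem.List.pyRange (j + 1) ((cookie.length : Int) + 1) 1) :=
        List.mem_of_mem_filter (List.mem_of_getLast? hlast)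
      obtain ⟨hm1, hm2⟩ := PySem.List.mem_pyRange_one.1 hmM
      have hafter : pgetB (prefixesB 0 cookie) m - pgetB (prefixesB 0 cookie) j
          = (PySem.List.slice cookie (some j) (some m)).sum :=
        pref_diff cookie j m (by omega) (by omega) (by omega)
      show (match (if (PySem.List.slice cookie (some j) (some m)).sum =
              (PySem.List.slice cookie (some i) (some j)).sum then
            (if (PySem.List.slice cookie (some i) (some j)).sum = canMax
              then (Except.error canMax : Except Int (Option Int))
              else Except.ok (some (max (PySem.List.slice cookie (some i) (some j)).sum ans)))
            else Except.ok none) with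
          | Except.error v => Except.error v
          | Except.ok none => jloopA cookie canMax i rest ans flag
          | Except.ok (some a') => jloopA cookie canMax i rest a' true)
        = Except.map (fun a => (a, flag || decide (ans < a)))
          (if pgetB (prefixesB 0 cookie) m - pgetB (prefixesB 0 cookie) j =
              (PySem.List.slice cookie (some i) (some j)).sum then
            (if (PySem.List.slice cookie (some i) (some j)).sum = canMax
              then (Except.error canMax : Except Int Int)
              else jloopB cookie (prefixesB 0 cookie) canMax i rest
                (PySem.List.slice cookie (some i) (some j)).sum)
            else jloopB cookie (prefixesB 0 cookie) canMax i rest ans)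
      rw [hafter]
      by_cases h3 : (PySem.List.slice cookie (some j) (some m)).sum =
          (PySem.List.slice cookie (some i) (some j)).sum
      · rw [if_pos h3, if_pos h3]
        by_cases h4 : (PySem.List.slice cookie (some i) (some j)).sum = canMax
        · rw [if_pos h4, if_pos h4]; rfl
        · rw [if_neg h4, if_neg h4]
          show jloopA cookie canMax i rest (max (PySem.List.slice cookie (some i) (some j)).sum ans)
              true = _
          have hmax : max (PySem.List.slice cookie (some i) (some j)).sum ans
              = (PySem.List.slice cookie (some i) (some j)).sum := by omega
          rw [hmax, ih hrest _ true]
          rcases hres : jloopB cookie (prefixesB 0 cookie) canMax i rest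
              (PySem.List.slice cookie (some i) (some j)).sum with v | a
          · rfl
          · have hge := jloopB_mono cookie (prefixesB 0 cookie) canMax i rest _ a hres
            have hda : decide (ans < a) = true := by simp; omega
            simp only [Except.map, hda, Bool.or_true, Bool.true_or]
      · rw [if_neg h3, if_neg h3]
        exact ih hrest ans flag

-- the i loops agree
theorem iloop_eq (cookie : List Int) (canMax : Int) :
    ∀ (is : List Int), (∀ i ∈ is, 0 ≤ i) →
    ∀ (ans : Int) (flag : Bool),
    iloopA cookie canMax is ans flag =
      (iloopB cookie (prefixesB 0 cookie) canMax is ans).map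
        (fun a => (a, flag || decide (ans < a))) := by
  intro is
  induction is with
  | nil => intro _ ans flag; simp [iloopA, iloopB, Except.map]
  | cons i rest ih =>
    intro his ans flag
    have hi : 0 ≤ i := his i List.mem_cons_self
    have hrest := fun i' hi' => his i' (List.mem_cons_of_mem _ hi')
    simp only [iloopA, iloopB]
    rw [jloop_eq cookie canMax i hi _
      (fun j hj => by
        obtain ⟨h1, h2⟩ := PySem.List.mem_pyRange_one.1 hj; exact ⟨by omega, h2⟩) ans flag]
    rcases hj : jloopB cookie (prefixesB 0 cookie) canMax i
        (PySem.List.pyRange (i + 1) (cookie.length : Int) 1) ans with v | a'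
    · rfl
    · have h1 : ans ≤ a' := jloopB_mono _ _ _ _ _ _ _ hj
      simp only [Except.map]
      rw [ih hrest a' (flag || decide (ans < a'))]
      rcases hio : iloopB cookie (prefixesB 0 cookie) canMax rest a' with v | a
      · rfl
      · have h2 : a' ≤ a := iloopB_mono _ _ _ _ _ _ hio
        simp only [Except.map]
        congr 1
        rw [Bool.or_assoc]
        congr 1
        by_cases hx : ans < a'
        · have : ans < a := by omega
          simp [hx, this]
        · have he : ans = a' := by omega
          subst he; simp

-- ===== VERDICT (by name: the statement is the Claim_ definition above) =====
theorem solution_spec : Claim_equal_solution := by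
  unfold Claim_equal_solution Spec_solution
  intro cookie _
  have hsum : pgetB (prefixesB 0 cookie) (cookie.length : Int) = cookie.sum := by
    simp only [pgetB, PySem.List.pyGetD_natCast]
    rw [prefixesB_getD cookie 0 cookie.length le_rfl, List.take_length]
    ring
  simp only [solution, solution_alt, hsum]
  rw [iloop_eq cookie (PySem.Int.floordiv cookie.sum 2) _
    (fun i hiM => (PySem.List.mem_pyRange_one.1 hiM).1) 0 false]
  rcases hio : iloopB cookie (prefixesB 0 cookie) (PySem.Int.floordiv cookie.sum 2)
      (PySem.List.pyRange 0 ((cookie.length : Int) - 1) 1) 0 with v | a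
  · rfl
  · have h0 : 0 ≤ a := iloopB_mono _ _ _ _ _ _ hio
    simp only [Except.map, Bool.false_or]
    by_cases hx : 0 < a
    · simp [hx]
    · have : a = 0 := by omega
      subst this; simp
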